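-- pv_equiv track=rewrite | github.com/akekesi/Practice_Python | collatz_00.py | collatz_pathsnumber
-- ===== SOURCE A (Python) =====
-- def collatz_pathsnumber(A):
-- 	S = []
-- 	for i in range(len(A[0])):
-- 		L = []
-- 		for j in range(len(A)):
-- 			L.append(A[j][i])
-- 		S.append(variant(L))
-- 	return S
--
-- def variant(L):
-- 	S = 0
-- 	while len(L) != 0:
-- 		L0 = L[0]
-- 		s = 0
-- 		for i in range(len(L)):
-- 			if L0 == L[i]:
-- 				s += 1
-- 		for i in range(s):
-- 			L.remove(L0)
-- 		S += 1
-- 	return S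
-- ===== SOURCE B (Python) =====
-- def collatz_pathsnumber(A):
--     num_cols = len(A[0])
--     cols = [set() for _ in range(num_cols)]
--     for row in A:
--         for i in range(num_cols):
--             cols[i].add(row[i])
--     return [len(c) for c in cols]
-- ===== Notes on version B (the rewrite author's own statement) =====
-- stated objective: faster
-- what changed: Instead of extracting each column and repeatedly counting and removing all copies of its first element (quadratic per column), B makes one row-major pass building a hash set per column and returns the set sizes.
import Mathlib
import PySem

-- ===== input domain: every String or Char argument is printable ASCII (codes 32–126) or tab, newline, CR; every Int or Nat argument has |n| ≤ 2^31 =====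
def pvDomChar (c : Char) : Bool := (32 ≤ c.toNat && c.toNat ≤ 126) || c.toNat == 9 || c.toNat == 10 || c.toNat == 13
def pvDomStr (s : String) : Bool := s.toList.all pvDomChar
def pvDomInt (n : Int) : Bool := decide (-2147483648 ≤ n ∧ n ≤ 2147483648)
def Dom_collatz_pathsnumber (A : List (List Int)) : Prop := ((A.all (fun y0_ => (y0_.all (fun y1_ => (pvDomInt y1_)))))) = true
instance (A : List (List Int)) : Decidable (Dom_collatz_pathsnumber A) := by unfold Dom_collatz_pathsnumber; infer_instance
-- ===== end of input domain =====

-- B replaces A's per-column count-and-remove-all-copies loop by one row-major pass building a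
-- set per column and mapping len over the table (objective: faster).

-- ===== PORT A =====
-- 'variant' helper: while L: count occurrences of L[0], remove them all, S += 1.
-- Fuel = L.length suffices: each round removes at least one element.
def pvVariantGo : Nat → List Int → Int → Int
  | 0, _, S => S
  | fuel+1, L, S =>
    if L.isEmpty then S
    else
      pvVariantGo fuel
        ((PySem.List.pyRange 0
            ((PySem.List.pyRange 0 (PySem.List.len L) 1).foldl
              (fun s i => if PySem.List.pyGetD L 0 0 == PySem.List.pyGetD L i 0 then s + 1 else s)
              (0 : Int)) 1).foldl
          (fun M _ => (PySem.List.remove? M (PySem.List.pyGetD L 0 0)).getD M) L)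
        (S + 1)

def pvVariant (L : List Int) : Int := pvVariantGo L.length L 0

def collatz_pathsnumber (A : List (List Int)) : List Int :=
  (PySem.List.pyRange 0 ((PySem.List.pyGetD A 0 []).length : Int) 1).foldl (fun S i =>
    S ++ [pvVariant ((PySem.List.pyRange 0 (PySem.List.len A) 1).foldl
      (fun L j => L ++ [PySem.List.pyGetD (PySem.List.pyGetD A j []) i 0]) [])]) []

-- ===== PORT B =====
def collatz_pathsnumber_alt (A : List (List Int)) : List Int :=
  (A.foldl (fun cols row =>
    (PySem.List.pyRange 0 ((PySem.List.pyGetD A 0 []).length : Int) 1).foldl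
      (fun cols i => PySem.List.pySetD cols i
        (PySem.Set.add (PySem.List.pyGetD cols i []) (PySem.List.pyGetD row i 0))) cols)
    ((PySem.List.pyRange 0 ((PySem.List.pyGetD A 0 []).length : Int) 1).map
      (fun _ => (PySem.Set.empty : PySem.Set Int)))).map (fun c => PySem.Set.len c)

-- ===== PRECONDITION & SPEC =====
-- Pre_ excludes exactly the inputs where Python A raises IndexError: the empty matrix
-- (A[0] raises) and ragged matrices with a row shorter than the first row (A[j][i] raises).
def Pre_collatz_pathsnumber (A : List (List Int)) : Prop :=
  A ≠ [] ∧ ∀ row ∈ A, (A.headD []).length ≤ row.length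
instance (A : List (List Int)) : Decidable (Pre_collatz_pathsnumber A) := by
  unfold Pre_collatz_pathsnumber; infer_instance

def pvWitness_collatz_pathsnumber : List (List Int) := [[1, 2], [1, 3]]

def Spec_collatz_pathsnumber (A : List (List Int)) (out : List Int) : Prop := out = collatz_pathsnumber_alt A
instance (A : List (List Int)) (out : List Int) : Decidable (Spec_collatz_pathsnumber A out) := by unfold Spec_collatz_pathsnumber; infer_instance

-- ===== CLAIM (what is proved, stated in full; the proofs are below) =====
def Claim_equal_collatz_pathsnumber : Prop := ∀ (A : List (List Int)), Dom_collatz_pathsnumber A → Pre_collatz_pathsnumber A → Spec_collatz_pathsnumber A (collatz_pathsnumber A)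

-- ===== LEMMAS AND PROOFS =====

-- column k of the matrix, read with the same default both ports use
def pvCol (A : List (List Int)) (k : Nat) : List Int := A.map (fun row => row.getD k 0)

-- distinct count, the common value both sides compute
def pvDistinct (L : List Int) : Nat := L.toFinset.card

lemma pvOfList_length (L : List Int) : (PySem.Set.ofList L).length = pvDistinct L := by
  have h1 : (PySem.Set.ofList L).toFinset = L.toFinset := by
    ext x; simp [PySem.Set.mem_ofList]
  have h2 := List.toFinset_card_of_nodup (PySem.Set.nodup_ofList L)
  rw [pvDistinct, ← h1, h2]

lemma pvFilter_erase (l : List Int) (a : Int) :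
    (l.erase a).filter (fun x => x ≠ a) = l.filter (fun x => x ≠ a) := by
  induction l with
  | nil => rfl
  | cons b t ih =>
    by_cases h : b = a
    · subst h; simp [List.erase_cons_head]
    · rw [List.erase_cons_tail (by simp [h])]
      simp only [List.filter_cons, ih]

-- applying "remove first occurrence of a" (count a l) times yields the a-free sublist
lemma pvIterErase (n : Nat) : ∀ (l : List Int) (a : Int), l.count a = n →
    (fun M => (PySem.List.remove? M a).getD M)^[n] l = l.filter (fun x => x ≠ a) := by
  induction n with
  | zero =>
    intro l a h
    have hnotmem : a ∉ l := by simpa using (List.count_eq_zero.mp h)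
    rw [Function.iterate_zero_apply]
    symm
    rw [List.filter_eq_self]
    intro x hx
    simp only [decide_eq_true_eq]
    rintro rfl; exact hnotmem hx
  | succ n ih =>
    intro l a h
    have hmem : a ∈ l := by
      by_contra hn; rw [List.count_eq_zero.mpr hn] at h; omega
    rw [Function.iterate_succ_apply]
    have hrm : (PySem.List.remove? l a).getD l = l.erase a := by
      rw [PySem.List.remove?_eq_some_erase l a hmem]; rfl
    rw [hrm, ih (l.erase a) a (by rw [List.count_erase_self]; omega), pvFilter_erase]

-- a fold that ignores the index is an iterate
lemma pvFoldl_const {β : Type} (step : β → β) (ids : List Int) (x : β) :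
    ids.foldl (fun y _ => step y) x = step^[ids.length] x := by
  induction ids generalizing x with
  | nil => rfl
  | cons i t ih => simp [List.foldl_cons, ih, Function.iterate_succ_apply]

lemma pvDistinct_cons (a : Int) (t : List Int) :
    pvDistinct (a :: t) = pvDistinct ((a :: t).filter (fun x => x ≠ a)) + 1 := by
  have hmem : a ∈ (a :: t).toFinset := by simp
  have h1 := Finset.card_erase_add_one hmem
  have h2 : ((a :: t).toFinset).erase a = ((a :: t).filter (fun x => x ≠ a)).toFinset := by
    rw [List.toFinset_filter]
    ext x
    simp [Finset.mem_erase, Finset.mem_filter, and_comm]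
    tauto
  rw [pvDistinct, pvDistinct, ← h1, h2]

lemma pvVariantGo_eq (fuel : Nat) : ∀ (L : List Int) (S : Int), L.length ≤ fuel →
    pvVariantGo fuel L S = S + (pvDistinct L : Int) := by
  induction fuel with
  | zero =>
    intro L S h
    have : L = [] := List.length_eq_zero_iff.mp (Nat.le_zero.mp h)
    subst this; simp [pvVariantGo, pvDistinct]
  | succ fuel ih =>
    intro L S h
    match L with
    | [] => simp [pvVariantGo, pvDistinct]
    | a :: t =>
      rw [pvVariantGo]
      simp only [List.isEmpty_cons, Bool.false_eq_true, if_false]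
      have hL0 : PySem.List.pyGetD (a :: t) 0 0 = a := PySem.List.pyGetD_zero_cons a t 0
      rw [hL0]
      have hcnteq : (fun (s : Int) (x : Int) => if a == x then s + 1 else s)
          = (fun (s : Int) (x : Int) => if x == a then s + 1 else s) := by
        funext s x; simp only [beq_iff_eq]; by_cases hx : x = a
        · simp [hx]
        · simp [hx, Ne.symm hx]
      have hs : (PySem.List.pyRange 0 (PySem.List.len (a :: t)) 1).foldl
          (fun s i => if a == PySem.List.pyGetD (a :: t) i 0 then s + 1 else s) (0 : Int)
          = ((a :: t).count a : Int) := by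
        rw [PySem.List.foldl_pyRange_zero_pyGetD (a :: t) 0
              (fun s x => if a == x then s + 1 else s) 0, hcnteq,
            PySem.List.foldl_beq_add_one]
        simp
      rw [hs]
      have hlen : (PySem.List.pyRange 0 (((a :: t).count a : Int)) 1).length
          = (a :: t).count a := by
        rw [PySem.List.length_pyRange_one]; omega
      have hrem : (PySem.List.pyRange 0 (((a :: t).count a : Int)) 1).foldl
          (fun M _ => (PySem.List.remove? M a).getD M) (a :: t)
          = (a :: t).filter (fun x => x ≠ a) := by
        rw [pvFoldl_const, hlen, pvIterErase ((a :: t).count a) (a :: t) a rfl]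
      rw [hrem]
      have hfe : ((a :: t).filter (fun x => x ≠ a)) = t.filter (fun x => x ≠ a) := by
        simp
      have hlt : ((a :: t).filter (fun x => x ≠ a)).length ≤ fuel := by
        rw [hfe]
        have h2 := List.length_filter_le (fun x => decide (x ≠ a)) t
        have h3 : t.length ≤ fuel := by
          simp only [List.length_cons] at h; omega
        exact le_trans h2 h3
      rw [ih _ _ hlt, pvDistinct_cons a t]
      push_cast; ring

lemma pvVariant_eq (L : List Int) : pvVariant L = (pvDistinct L : Int) := by
  rw [pvVariant, pvVariantGo_eq L.length L 0 le_rfl]; ring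

-- A's port computes the per-column distinct counts
lemma pvPortA_eq (A : List (List Int)) :
    collatz_pathsnumber A
      = (List.range (PySem.List.pyGetD A 0 []).length).map
          (fun k => (pvDistinct (pvCol A k) : Int)) := by
  rw [collatz_pathsnumber]
  have hcol : ∀ (i : Int), (PySem.List.pyRange 0 (PySem.List.len A) 1).foldl
      (fun L j => L ++ [PySem.List.pyGetD (PySem.List.pyGetD A j []) i 0]) []
      = A.map (fun row => PySem.List.pyGetD row i 0) := by
    intro i
    rw [PySem.List.foldl_pyRange_zero_pyGetD A []
          (fun L row => L ++ [PySem.List.pyGetD row i 0]) [],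
        PySem.List.foldl_append_singleton_eq_map]
    simp
  simp only [hcol]
  rw [PySem.List.pyRange_one, List.foldl_map,
      PySem.List.foldl_append_singleton_eq_map
        (fun k : Nat => pvVariant (A.map (fun row => PySem.List.pyGetD row (0 + (k : Int)) 0)))]
  rw [List.nil_append, show ((((PySem.List.pyGetD A 0 []).length : Int)) - 0).toNat
        = (PySem.List.pyGetD A 0 []).length by omega]
  apply List.map_congr_left
  intro k _
  have hmap : A.map (fun row => PySem.List.pyGetD row (0 + (k : Int)) 0) = pvCol A k := by
    rw [pvCol]
    apply List.map_congr_left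
    intro row _
    rw [zero_add, PySem.List.pyGetD_natCast]
  rw [pvVariant_eq, hmap]

-- one row step of B: every column's set gets that row's entry added
lemma pvSetRange {β : Type} (g : Nat → β → β) (d : β) :
    ∀ (n : Nat) (cols : List β), n ≤ cols.length →
    (List.range n).foldl (fun c k => c.set k (g k (c.getD k d))) cols
      = (List.range n).map (fun k => g k (cols.getD k d)) ++ cols.drop n := by
  intro n
  induction n with
  | zero => intro cols _; simp
  | succ n ih =>
    intro cols hn
    rw [List.range_succ, List.foldl_append, List.foldl_cons, List.foldl_nil,
        ih cols (by omega)]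
    have hlenmap : ((List.range n).map (fun k => g k (cols.getD k d))).length = n := by simp
    have hdrop : cols.drop n = cols.getD n d :: cols.drop (n + 1) := by
      have hg : cols.getD n d = cols[n] := by
        rw [List.getD_eq_getElem?_getD, List.getElem?_eq_getElem (by omega)]; rfl
      rw [hg]
      exact List.drop_eq_getElem_cons (by omega)
    have hget : ((List.range n).map (fun k => g k (cols.getD k d)) ++ cols.drop n).getD n d
        = cols.getD n d := by
      rw [List.getD_eq_getElem?_getD,
          List.getElem?_append_right (le_of_eq hlenmap),
          hlenmap, Nat.sub_self, hdrop]
      rfl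
    have hset : ((List.range n).map (fun k => g k (cols.getD k d)) ++ cols.drop n).set n
          (g n (cols.getD n d))
        = (List.range n).map (fun k => g k (cols.getD k d))
            ++ g n (cols.getD n d) :: cols.drop (n + 1) := by
      rw [List.set_append_right n _ (le_of_eq hlenmap), hlenmap, Nat.sub_self, hdrop,
          List.set_cons_zero]
    rw [hget, hset, List.map_append, List.append_assoc]
    rfl

-- the whole fold of B over the rows, per column
lemma pvRowsFold (n : Nat) :
    ∀ (R : List (List Int)) (cols : List (PySem.Set Int)), cols.length = n →
    R.foldl (fun cols row =>
      (PySem.List.pyRange 0 (n : Int) 1).foldl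
        (fun cols i => PySem.List.pySetD cols i
          (PySem.Set.add (PySem.List.pyGetD cols i []) (PySem.List.pyGetD row i 0))) cols) cols
    = (List.range n).map (fun k =>
        R.foldl (fun s row => PySem.Set.add s (row.getD k 0)) (cols.getD k [])) := by
  intro R
  induction R with
  | nil =>
    intro cols hc
    simp only [List.foldl_nil]
    apply List.ext_getElem
    · simp [hc]
    · intro k h1 h2
      simp only [List.getElem_map, List.getElem_range]
      rw [List.getD_eq_getElem?_getD, List.getElem?_eq_getElem h1]
      rfl
  | cons row R ih =>
    intro cols hc
    rw [List.foldl_cons]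
    have hstep : (PySem.List.pyRange 0 (n : Int) 1).foldl
        (fun cols i => PySem.List.pySetD cols i
          (PySem.Set.add (PySem.List.pyGetD cols i []) (PySem.List.pyGetD row i 0))) cols
        = (List.range n).map (fun k => PySem.Set.add (cols.getD k []) (row.getD k 0)) := by
      rw [PySem.List.pyRange_one, List.foldl_map]
      have hbody : (fun (c : List (PySem.Set Int)) (k : Nat) => PySem.List.pySetD c ((0 : Int) + (k : Int))
            (PySem.Set.add (PySem.List.pyGetD c ((0 : Int) + (k : Int)) [])
              (PySem.List.pyGetD row ((0 : Int) + (k : Int)) 0)))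
          = (fun (c : List (PySem.Set Int)) (k : Nat) =>
              c.set k (PySem.Set.add (c.getD k []) (row.getD k 0))) := by
        funext c k
        rw [zero_add, PySem.List.pySetD_natCast, PySem.List.pyGetD_natCast,
            PySem.List.pyGetD_natCast]
      rw [show (((n : Int)) - 0).toNat = n by omega, hbody,
          pvSetRange (fun k s => PySem.Set.add s (row.getD k 0)) [] n cols (by omega)]
      rw [← hc, List.drop_length, List.append_nil]
    rw [hstep, ih _ (by simp)]
    apply List.map_congr_left
    intro k hk
    rw [List.foldl_cons]
    congr 1
    rw [List.getD_eq_getElem?_getD, List.getElem?_map,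
        List.getElem?_eq_getElem (by simpa using hk)]
    simp

lemma pvPortB_eq (A : List (List Int)) :
    collatz_pathsnumber_alt A
      = (List.range (PySem.List.pyGetD A 0 []).length).map
          (fun k => (pvDistinct (pvCol A k) : Int)) := by
  rw [collatz_pathsnumber_alt]
  have hinit : ((PySem.List.pyRange 0 ((PySem.List.pyGetD A 0 []).length : Int) 1).map
      (fun _ => (PySem.Set.empty : PySem.Set Int))).length
      = (PySem.List.pyGetD A 0 []).length := by
    simp [PySem.List.length_pyRange_one]
  rw [pvRowsFold (PySem.List.pyGetD A 0 []).length A _ hinit, List.map_map]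
  apply List.map_congr_left
  intro k hk
  have hgetD : ((PySem.List.pyRange 0 ((PySem.List.pyGetD A 0 []).length : Int) 1).map
      (fun _ => (PySem.Set.empty : PySem.Set Int))).getD k [] = [] := by
    rw [List.getD_eq_getElem?_getD, List.getElem?_map]
    cases h : (PySem.List.pyRange 0 ((PySem.List.pyGetD A 0 []).length : Int) 1)[k]? <;> rfl
  simp only [Function.comp]
  rw [hgetD]
  have hfold : A.foldl (fun s row => PySem.Set.add s (row.getD k 0)) ([] : PySem.Set Int)
      = PySem.Set.ofList (pvCol A k) := by
    rw [PySem.Set.ofList_eq_foldl, pvCol, List.foldl_map]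
  rw [hfold]
  have hlen : PySem.Set.len (PySem.Set.ofList (pvCol A k))
      = ((PySem.Set.ofList (pvCol A k)).length : Int) := rfl
  rw [hlen, pvOfList_length]

-- ===== VERDICT (by name: the statement is the Claim_ definition above) =====
theorem collatz_pathsnumber_spec : Claim_equal_collatz_pathsnumber := by
  intro A _ _
  unfold Spec_collatz_pathsnumber
  rw [pvPortA_eq, pvPortB_eq]
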